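-- pv_equiv track=rewrite | github.com/sususaiasusubendera/leetcode | 3714-longest-balanced-substring-ii/3714-longest-balanced-substring-ii.py | solve3
-- ===== SOURCE A (Python) =====
-- def solve3(s):
--     res, ca, cb, cc = 0, 0, 0, 0
--     freq = {}
--     for i in range(0, len(s)):
--         match s[i]:
--             case 'a': ca += 1
--             case 'b': cb += 1
--             case 'c': cc += 1
--
--         if ca == cb == cc:
--             res = i + 1
--         else:
--             diff = (ca - cb, cb - cc)
--             if diff in freq:
--                 l = i - freq[diff]
--                 res = max(res, l)
--             else:
--                 freq[diff] = i
--     return res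
-- ===== SOURCE B (Python) =====
-- def solve3(s):
--     # Brute force over a prefix-difference table: O(n^2) nested scan, no hashmap.
--     d = [(0, 0)]
--     x, y = 0, 0
--     for ch in s:
--         if ch == 'a':
--             x += 1
--         elif ch == 'b':
--             x -= 1
--             y += 1
--         elif ch == 'c':
--             y -= 1
--         d.append((x, y))
--     res = 0
--     for j in range(len(d)):
--         for i in range(j):
--             if d[i] == d[j] and j - i > res:
--                 res = j - i
--     return res
-- ===== Notes on version B (the rewrite author's own statement) =====
-- stated objective: alternative
-- what changed: Replaces the one-pass hashmap of first-seen prefix-difference keys with an explicit prefix-difference table followed by a brute-force nested scan over all index pairs taking the maximal balanced span.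
import Mathlib
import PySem

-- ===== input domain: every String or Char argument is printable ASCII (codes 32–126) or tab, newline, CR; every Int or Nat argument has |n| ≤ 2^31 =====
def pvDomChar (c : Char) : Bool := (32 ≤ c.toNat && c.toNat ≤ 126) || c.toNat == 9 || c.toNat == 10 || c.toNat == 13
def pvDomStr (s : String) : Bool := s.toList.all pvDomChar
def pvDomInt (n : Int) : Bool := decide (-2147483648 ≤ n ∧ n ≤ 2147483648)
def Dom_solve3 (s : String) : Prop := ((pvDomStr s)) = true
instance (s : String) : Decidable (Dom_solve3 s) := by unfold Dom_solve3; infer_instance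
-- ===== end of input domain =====

-- B replaces A's one-pass first-occurrence hashmap with a prefix-difference table and a
-- brute-force nested scan over all index pairs (alternative decomposition; not faster).

-- ===== PORT A =====
-- 'for i in range(0, len(s)): … s[i] …' is ported as a fold over list(enumerate(s)): same
-- iterations, same index i and character s[i] at each step.
def stepA (st : Int × Int × Int × Int × PySem.Dict (Int × Int) Int) (p : Int × Char) :
    Int × Int × Int × Int × PySem.Dict (Int × Int) Int :=
  let res := st.1; let ca := st.2.1; let cb := st.2.2.1; let cc := st.2.2.2.1
  let freq := st.2.2.2.2
  let i := p.1; let c := p.2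
  let ca := if c = 'a' then ca + 1 else ca
  let cb := if c = 'b' then cb + 1 else cb
  let cc := if c = 'c' then cc + 1 else cc
  if ca = cb ∧ cb = cc then (i + 1, ca, cb, cc, freq)
  else
    let diff := (ca - cb, cb - cc)
    match freq.get? diff with
    | some t => (max res (i - t), ca, cb, cc, freq)
    | none => (res, ca, cb, cc, freq.insert diff i)

def solve3 (s : String) : Int :=
  ((PySem.List.enumerate s.toList 0).foldl stepA (0, 0, 0, 0, PySem.Dict.empty)).1

-- ===== PORT B =====
def stepB (st : List (Int × Int) × Int × Int) (ch : Char) : List (Int × Int) × Int × Int :=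
  let x := if ch = 'a' then st.2.1 + 1 else if ch = 'b' then st.2.1 - 1 else st.2.1
  let y := if ch = 'b' then st.2.2 + 1 else if ch = 'c' then st.2.2 - 1 else st.2.2
  (st.1 ++ [(x, y)], x, y)

def solve3_alt (s : String) : Int :=
  let d := (s.toList.foldl stepB ([((0 : Int), (0 : Int))], 0, 0)).1
  (PySem.List.pyRange 0 (d.length : Int) 1).foldl (fun res j =>
    (PySem.List.pyRange 0 j 1).foldl (fun res i =>
      if PySem.List.pyGetD d i (0, 0) = PySem.List.pyGetD d j (0, 0) ∧ j - i > res then j - i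
      else res) res) 0

-- ===== PRECONDITION & SPEC =====
def Spec_solve3 (s : String) (out : Int) : Prop := out = solve3_alt s
instance (s : String) (out : Int) : Decidable (Spec_solve3 s out) := by unfold Spec_solve3; infer_instance

-- ===== CLAIM (what is proved, stated in full; the proofs are below) =====
def Claim_equal_solve3 : Prop := ∀ (s : String), Dom_solve3 s → Spec_solve3 s (solve3 s)

-- ===== LEMMAS AND PROOFS =====

-- prefix-difference machinery shared by both proofs
def dstep (q : Int × Int) (c : Char) : Int × Int :=
  (if c = 'a' then q.1 + 1 else if c = 'b' then q.1 - 1 else q.1,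
   if c = 'b' then q.2 + 1 else if c = 'c' then q.2 - 1 else q.2)

def dlist (q : Int × Int) : List Char → List (Int × Int)
  | [] => []
  | c :: cs => dstep q c :: dlist (dstep q c) cs

def lastD (q : Int × Int) : List Char → Int × Int
  | [] => q
  | c :: cs => lastD (dstep q c) cs

def ds0 (cs : List Char) : List (Int × Int) := ((0 : Int), (0 : Int)) :: dlist (0, 0) cs

def fidx (key : Int × Int) : List (Int × Int) → Option Nat
  | [] => none
  | q :: qs => if q = key then some 0 else (fidx key qs).map (· + 1)

-- "r is the length of the longest balanced span among prefixes 0..m-1 of ds"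
def GoodG (ds : List (Int × Int)) (m : Nat) (r : Int) : Prop :=
  r = 0 ∨ ∃ u v : Nat, u < v ∧ v < m ∧ ds.getD u (0, 0) = ds.getD v (0, 0) ∧ r = (v : Int) - (u : Int)

def BoundG (ds : List (Int × Int)) (m : Nat) (r : Int) : Prop :=
  ∀ u v : Nat, u < v → v < m → ds.getD u (0, 0) = ds.getD v (0, 0) → (v : Int) - (u : Int) ≤ r

def IsBestG (ds : List (Int × Int)) (m : Nat) (r : Int) : Prop :=
  0 ≤ r ∧ GoodG ds m r ∧ BoundG ds m r

theorem best_unique {ds : List (Int × Int)} {m : Nat} {r r' : Int}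
    (h : IsBestG ds m r) (h' : IsBestG ds m r') : r = r' := by
  obtain ⟨hr0, hg, hb⟩ := h
  obtain ⟨hr0', hg', hb'⟩ := h'
  have h1 : r ≤ r' := by
    rcases hg with h | ⟨u, v, huv, hv, he, hre⟩
    · omega
    · have := hb' u v huv hv he; omega
  have h2 : r' ≤ r := by
    rcases hg' with h | ⟨u, v, huv, hv, he, hre⟩
    · omega
    · have := hb u v huv hv he; omega
  omega

theorem dlist_append (q : Int × Int) (cs : List Char) (c : Char) :
    dlist q (cs ++ [c]) = dlist q cs ++ [dstep (lastD q cs) c] := by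
  induction cs generalizing q with
  | nil => rfl
  | cons c' cs ih => simp [dlist, lastD, ih]

theorem lastD_append (q : Int × Int) (cs : List Char) (c : Char) :
    lastD q (cs ++ [c]) = dstep (lastD q cs) c := by
  induction cs generalizing q with
  | nil => rfl
  | cons c' cs ih => simp [lastD, ih]

theorem length_dlist (q : Int × Int) (cs : List Char) : (dlist q cs).length = cs.length := by
  induction cs generalizing q with
  | nil => rfl
  | cons c cs ih => simp [dlist, ih]

theorem fidx_append_of_some {key : Int × Int} {l : List (Int × Int)} {m : Nat}
    (h : fidx key l = some m) (x : Int × Int) : fidx key (l ++ [x]) = some m := by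
  induction l generalizing m with
  | nil => simp [fidx] at h
  | cons q qs ih =>
    simp only [fidx, List.cons_append] at h ⊢
    by_cases hq : q = key
    · simpa [hq] using h
    · simp only [if_neg hq] at h ⊢
      obtain ⟨m', hm', rfl⟩ := Option.map_eq_some_iff.mp h
      simp [ih hm']

theorem fidx_append_of_none {key : Int × Int} {l : List (Int × Int)}
    (h : fidx key l = none) (x : Int × Int) :
    fidx key (l ++ [x]) = if x = key then some l.length else none := by
  induction l with
  | nil => simp [fidx]
  | cons q qs ih =>
    simp only [fidx, List.cons_append] at h ⊢
    by_cases hq : q = key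
    · simp [hq] at h
    · simp only [if_neg hq] at h ⊢
      have hn : fidx key qs = none := by
        cases hf : fidx key qs <;> simp [hf] at h ⊢
      rw [ih hn]
      by_cases hx : x = key <;> simp [hx, List.length_cons]

theorem fidx_some_spec {key : Int × Int} {l : List (Int × Int)} {m : Nat}
    (h : fidx key l = some m) :
    m < l.length ∧ l.getD m (0, 0) = key ∧ ∀ k, k < m → l.getD k (0, 0) ≠ key := by
  induction l generalizing m with
  | nil => simp [fidx] at h
  | cons q qs ih =>
    simp only [fidx] at h
    by_cases hq : q = key
    · simp only [if_pos hq, Option.some.injEq] at h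
      subst h
      exact ⟨by simp, by simpa using hq, by omega⟩
    · simp only [if_neg hq] at h
      obtain ⟨m', hm', rfl⟩ := Option.map_eq_some_iff.mp h
      obtain ⟨h1, h2, h3⟩ := ih hm'
      refine ⟨by simpa using h1, by simpa using h2, ?_⟩
      intro k hk
      cases k with
      | zero => simpa using hq
      | succ k => simpa using h3 k (by omega)

theorem fidx_none_spec {key : Int × Int} {l : List (Int × Int)}
    (h : fidx key l = none) : ∀ k, k < l.length → l.getD k (0, 0) ≠ key := by
  induction l with
  | nil => simp
  | cons q qs ih =>
    simp only [fidx] at h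
    by_cases hq : q = key
    · simp [hq] at h
    · simp only [if_neg hq] at h
      have hn : fidx key qs = none := by
        cases hf : fidx key qs <;> simp [hf] at h ⊢
      intro k hk
      cases k with
      | zero => simpa using hq
      | succ k => simpa using ih hn k (by simpa using hk)

theorem bfold (cs : List Char) (d0 : List (Int × Int)) (x y : Int) :
    cs.foldl stepB (d0, x, y) = (d0 ++ dlist (x, y) cs, lastD (x, y) cs) := by
  induction cs generalizing d0 x y with
  | nil => simp [dlist, lastD]
  | cons c cs ih =>
    have hstep : stepB (d0, x, y) c = (d0 ++ [dstep (x, y) c], dstep (x, y) c) := by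
      simp [stepB, dstep]
    simp only [List.foldl_cons, hstep, dlist, lastD]
    cases hd : dstep (x, y) c with
    | mk dx dy => simpa [hd] using ih (d0 ++ [(dx, dy)]) dx dy

theorem inner_loop (ds : List (Int × Int)) (j : Nat) (r0 : Int) (k : Nat) :
    let r := (PySem.List.pyRange 0 (k : Int) 1).foldl (fun res i =>
      if PySem.List.pyGetD ds i (0, 0) = PySem.List.pyGetD ds (j : Int) (0, 0) ∧ (j : Int) - i > res
      then (j : Int) - i else res) r0
    r0 ≤ r ∧
    (r = r0 ∨ ∃ u : Nat, u < k ∧ ds.getD u (0, 0) = ds.getD j (0, 0) ∧ r = (j : Int) - (u : Int)) ∧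
    (∀ u : Nat, u < k → ds.getD u (0, 0) = ds.getD j (0, 0) → (j : Int) - (u : Int) ≤ r) := by
  induction k with
  | zero =>
    simp only [Nat.cast_zero, PySem.List.pyRange_one_eq_nil (le_refl 0), List.foldl_nil]
    exact ⟨le_refl _, by simp, by omega⟩
  | succ k ih =>
    obtain ⟨ih1, ih2, ih3⟩ := ih
    have hsplit : PySem.List.pyRange 0 ((k + 1 : Nat) : Int) 1
        = PySem.List.pyRange 0 (k : Int) 1 ++ [(k : Int)] := by
      push_cast
      exact PySem.List.pyRange_one_succ_right (by positivity)
    rw [hsplit, List.foldl_append]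
    set r := (PySem.List.pyRange 0 (k : Int) 1).foldl (fun res i =>
      if PySem.List.pyGetD ds i (0, 0) = PySem.List.pyGetD ds (j : Int) (0, 0) ∧ (j : Int) - i > res
      then (j : Int) - i else res) r0 with hr
    simp only [List.foldl_cons, List.foldl_nil, PySem.List.pyGetD_natCast]
    by_cases hc : ds.getD k (0, 0) = ds.getD j (0, 0) ∧ (j : Int) - (k : Int) > r
    · rw [if_pos hc]
      refine ⟨by omega, Or.inr ⟨k, by omega, hc.1, rfl⟩, ?_⟩
      intro u hu he
      rcases Nat.lt_succ_iff_lt_or_eq.mp hu with hu' | rfl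
      · have := ih3 u hu' he; omega
      · omega
    · rw [if_neg hc]
      refine ⟨ih1, ?_, ?_⟩
      · rcases ih2 with h | ⟨u, hu, he, hre⟩
        · exact Or.inl h
        · exact Or.inr ⟨u, by omega, he, hre⟩
      intro u hu he
      rcases Nat.lt_succ_iff_lt_or_eq.mp hu with hu' | rfl
      · exact ih3 u hu' he
      · rcases not_and_or.mp hc with h | h
        · exact absurd he h
        · omega

theorem outer_loop (ds : List (Int × Int)) (m : Nat) :
    IsBestG ds m ((PySem.List.pyRange 0 (m : Int) 1).foldl (fun res j =>
      (PySem.List.pyRange 0 j 1).foldl (fun res i =>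
        if PySem.List.pyGetD ds i (0, 0) = PySem.List.pyGetD ds j (0, 0) ∧ j - i > res then j - i
        else res) res) 0) := by
  induction m with
  | zero =>
    simp only [Nat.cast_zero, PySem.List.pyRange_one_eq_nil (le_refl 0), List.foldl_nil]
    exact ⟨le_refl _, Or.inl rfl, by intro u v h1 h2 _; omega⟩
  | succ m ih =>
    have hsplit : PySem.List.pyRange 0 ((m + 1 : Nat) : Int) 1
        = PySem.List.pyRange 0 (m : Int) 1 ++ [(m : Int)] := by
      push_cast
      exact PySem.List.pyRange_one_succ_right (by positivity)
    rw [hsplit, List.foldl_append]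
    set rm := (PySem.List.pyRange 0 (m : Int) 1).foldl (fun res j =>
      (PySem.List.pyRange 0 j 1).foldl (fun res i =>
        if PySem.List.pyGetD ds i (0, 0) = PySem.List.pyGetD ds j (0, 0) ∧ j - i > res then j - i
        else res) res) 0 with hrm
    obtain ⟨ih0, ihg, ihb⟩ := ih
    simp only [List.foldl_cons, List.foldl_nil]
    obtain ⟨h1, h2, h3⟩ := inner_loop ds m rm m
    refine ⟨by omega, ?_, ?_⟩
    · rcases h2 with h | ⟨u, hu, he, hre⟩
      · rw [h]
        rcases ihg with h' | ⟨u, v, huv, hv, he, hre⟩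
        · exact Or.inl h'
        · exact Or.inr ⟨u, v, huv, by omega, he, hre⟩
      · exact Or.inr ⟨u, m, hu, by omega, he, hre⟩
    · intro u v huv hv he
      rcases Nat.lt_succ_iff_lt_or_eq.mp hv with hv' | rfl
      · have := ihb u v huv hv' he; omega
      · exact h3 u huv he

theorem getD_append_last (l : List (Int × Int)) (x : Int × Int) :
    (l ++ [x]).getD l.length (0, 0) = x := by
  simp [List.getD_eq_getElem?_getD]

theorem getD_append_lt (l : List (Int × Int)) (x : Int × Int) (k : Nat) (h : k < l.length) :
    (l ++ [x]).getD k (0, 0) = l.getD k (0, 0) := by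
  simp [List.getD_eq_getElem?_getD, List.getElem?_append_left h]

theorem ds0_append (cs : List Char) (c : Char) :
    ds0 (cs ++ [c]) = ds0 cs ++ [dstep (lastD (0, 0) cs) c] := by
  simp [ds0, dlist_append]

theorem length_ds0 (cs : List Char) : (ds0 cs).length = cs.length + 1 := by
  simp [ds0, length_dlist]

theorem getD_zero_ds0 (cs : List Char) : (ds0 cs).getD 0 (0, 0) = (0, 0) := rfl

theorem pair_dstep (ca cb cc : Int) (c : Char) :
    ((if c = 'a' then ca + 1 else ca) - (if c = 'b' then cb + 1 else cb),
     (if c = 'b' then cb + 1 else cb) - (if c = 'c' then cc + 1 else cc))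
      = dstep (ca - cb, cb - cc) c := by
  simp only [dstep]
  split_ifs <;> simp_all [Prod.ext_iff] <;> omega

theorem A_inv (cs : List Char) :
    ((((PySem.List.enumerate cs 0).foldl stepA (0, 0, 0, 0, PySem.Dict.empty)).2.1 -
        ((PySem.List.enumerate cs 0).foldl stepA (0, 0, 0, 0, PySem.Dict.empty)).2.2.1,
      ((PySem.List.enumerate cs 0).foldl stepA (0, 0, 0, 0, PySem.Dict.empty)).2.2.1 -
        ((PySem.List.enumerate cs 0).foldl stepA (0, 0, 0, 0, PySem.Dict.empty)).2.2.2.1)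
       = lastD (0, 0) cs) ∧
    IsBestG (ds0 cs) (cs.length + 1)
      (((PySem.List.enumerate cs 0).foldl stepA (0, 0, 0, 0, PySem.Dict.empty)).1) ∧
    (∀ key, (((PySem.List.enumerate cs 0).foldl stepA (0, 0, 0, 0, PySem.Dict.empty)).2.2.2.2).get? key =
      if key = ((0 : Int), (0 : Int)) then none
      else (fidx key (ds0 cs)).map (fun m => (m : Int) - 1)) := by
  induction cs using List.reverseRecOn with
  | nil =>
    simp only [PySem.List.enumerate_nil, List.foldl_nil]
    refine ⟨rfl, ⟨le_refl _, Or.inl rfl, by intro u v h1 h2 _; simp at h2; omega⟩, ?_⟩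
    intro key
    by_cases hk : key = ((0 : Int), (0 : Int))
    · simp [hk, PySem.Dict.get?_empty]
    · have h0 : ((0 : Int), (0 : Int)) ≠ key := Ne.symm hk
      simp [hk, PySem.Dict.get?_empty, ds0, dlist, fidx, h0]
  | append_singleton cs c ih =>
    have henum : PySem.List.enumerate (cs ++ [c]) 0
        = PySem.List.enumerate cs 0 ++ [((cs.length : Int), c)] := by
      simp [PySem.List.enumerate_append, PySem.List.enumerate_cons]
    simp only [henum, List.foldl_append, List.foldl_cons, List.foldl_nil]
    revert ih
    generalize (PySem.List.enumerate cs 0).foldl stepA (0, 0, 0, 0, PySem.Dict.empty) = st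
    obtain ⟨r, ca, cb, cc, freq⟩ := st
    rintro ⟨ih1, ih2, ih3⟩
    simp only at ih1 ih2 ih3
    have hds : ds0 (cs ++ [c]) = ds0 cs ++ [dstep (lastD (0, 0) cs) c] := ds0_append cs c
    have hlast : lastD (0, 0) (cs ++ [c]) = dstep (lastD (0, 0) cs) c := lastD_append _ _ _
    have hlen : (ds0 cs).length = cs.length + 1 := length_ds0 cs
    simp only [stepA]
    set n := cs.length with hn
    set dnew := dstep (lastD (0, 0) cs) c with hdnew
    set ca' := if c = 'a' then ca + 1 else ca with hca
    set cb' := if c = 'b' then cb + 1 else cb with hcb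
    set cc' := if c = 'c' then cc + 1 else cc with hcc
    have hpair : (ca' - cb', cb' - cc') = dnew := by
      rw [hca, hcb, hcc, pair_dstep, ih1]
    obtain ⟨hr0, hgood, hbound⟩ := ih2
    have hrn : r ≤ (n : Int) := by
      rcases hgood with h | ⟨u, v, huv, hv, _, hre⟩ <;> omega
    have hlastget : (ds0 cs ++ [dnew]).getD (n + 1) (0, 0) = dnew := by
      rw [← hlen]; exact getD_append_last _ _
    have hzget : (ds0 cs ++ [dnew]).getD 0 (0, 0) = (0, 0) := by
      rw [getD_append_lt _ _ 0 (by omega)]; exact getD_zero_ds0 cs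
    have hlen2 : (cs ++ [c]).length + 1 = n + 2 := by simp [hn]
    by_cases hzero : dnew = (0, 0)
    · have hcondT : ca' = cb' ∧ cb' = cc' := by
        rw [hzero, Prod.ext_iff] at hpair; simp at hpair; omega
      rw [if_pos hcondT]
      refine ⟨by rw [hlast, ← hpair], ?_, ?_⟩
      · rw [hlen2, hds]
        refine ⟨by positivity, Or.inr ⟨0, n + 1, by omega, by omega, ?_, by push_cast; ring⟩, ?_⟩
        · rw [hzget, hlastget, hzero]
        · intro u v huv hv he
          rcases Nat.lt_succ_iff_lt_or_eq.mp hv with hv' | rfl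
          · rw [getD_append_lt _ _ u (by omega), getD_append_lt _ _ v (by omega)] at he
            have := hbound u v huv hv' he; omega
          · omega
      · intro key
        rw [ih3 key]
        by_cases hk : key = ((0 : Int), (0 : Int))
        · simp [hk]
        · have hfx : fidx key (ds0 (cs ++ [c])) = fidx key (ds0 cs) := by
            rw [hds]
            cases hf : fidx key (ds0 cs) with
            | some m => exact fidx_append_of_some hf _
            | none =>
              rw [fidx_append_of_none hf, if_neg]
              rw [hzero]; exact Ne.symm hk
          rw [hfx]
    · have hcondF : ¬(ca' = cb' ∧ cb' = cc') := by
        rintro ⟨h1, h2⟩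
        apply hzero
        rw [← hpair, h1, h2, Prod.ext_iff]; constructor <;> simp
      rw [if_neg hcondF, hpair]
      have hfd := ih3 dnew
      rw [if_neg hzero] at hfd
      cases hf : fidx dnew (ds0 cs) with
      | some m =>
        have hget : freq.get? dnew = some ((m : Int) - 1) := by rw [hfd, hf]; rfl
        rw [hget]
        dsimp only
        obtain ⟨hmlt, hmeq, hmmin⟩ := fidx_some_spec hf
        rw [hlen] at hmlt
        refine ⟨by rw [hlast, ← hpair], ?_, ?_⟩
        · rw [hlen2, hds]
          have hmget : (ds0 cs ++ [dnew]).getD m (0, 0) = dnew := by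
            rw [getD_append_lt _ _ m (by omega)]; exact hmeq
          refine ⟨by omega, ?_, ?_⟩
          · rcases le_total r ((n : Int) - ((m : Int) - 1)) with hmx | hmx
            · rw [max_eq_right hmx]
              exact Or.inr ⟨m, n + 1, by omega, by omega, by rw [hmget, hlastget], by push_cast; ring⟩
            · rw [max_eq_left hmx]
              rcases hgood with h | ⟨u, v, huv, hv, he, hre⟩
              · exact Or.inl h
              · refine Or.inr ⟨u, v, huv, by omega, ?_, hre⟩
                rw [getD_append_lt _ _ u (by omega), getD_append_lt _ _ v (by omega)]
                exact he
          · intro u v huv hv he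
            rcases Nat.lt_succ_iff_lt_or_eq.mp hv with hv' | rfl
            · rw [getD_append_lt _ _ u (by omega), getD_append_lt _ _ v (by omega)] at he
              have := hbound u v huv hv' he
              have := le_max_left r ((n : Int) - ((m : Int) - 1))
              omega
            · rw [getD_append_lt _ _ u (by omega), hlastget] at he
              have hum : ¬ u < m := fun hc => hmmin u hc he
              have := le_max_right r ((n : Int) - ((m : Int) - 1))
              omega
        · intro key
          rw [ih3 key]
          by_cases hk : key = ((0 : Int), (0 : Int))
          · simp [hk]
          · have hfx : fidx key (ds0 (cs ++ [c])) = fidx key (ds0 cs) := by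
              rw [hds]
              cases hf' : fidx key (ds0 cs) with
              | some m' => exact fidx_append_of_some hf' _
              | none =>
                rw [fidx_append_of_none hf', if_neg]
                intro he
                rw [he, hf'] at hf
                simp at hf
            rw [hfx]
      | none =>
        have hget : freq.get? dnew = none := by rw [hfd, hf]; rfl
        rw [hget]
        dsimp only
        refine ⟨by rw [hlast, ← hpair], ?_, ?_⟩
        · rw [hlen2, hds]
          refine ⟨hr0, ?_, ?_⟩
          · rcases hgood with h | ⟨u, v, huv, hv, he, hre⟩
            · exact Or.inl h
            · refine Or.inr ⟨u, v, huv, by omega, ?_, hre⟩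
              rw [getD_append_lt _ _ u (by omega), getD_append_lt _ _ v (by omega)]
              exact he
          · intro u v huv hv he
            rcases Nat.lt_succ_iff_lt_or_eq.mp hv with hv' | rfl
            · rw [getD_append_lt _ _ u (by omega), getD_append_lt _ _ v (by omega)] at he
              exact hbound u v huv hv' he
            · rw [getD_append_lt _ _ u (by omega), hlastget] at he
              exact absurd he (fidx_none_spec hf u (by omega))
        · intro key
          by_cases hk : key = dnew
          · rw [hk, PySem.Dict.get?_insert_self, if_neg hzero, hds,
              fidx_append_of_none hf, if_pos rfl, hlen]
            simp
          · rw [PySem.Dict.get?_insert, if_neg hk, ih3 key]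
            by_cases hk0 : key = ((0 : Int), (0 : Int))
            · simp [hk0]
            · have hfx : fidx key (ds0 (cs ++ [c])) = fidx key (ds0 cs) := by
                rw [hds]
                cases hf' : fidx key (ds0 cs) with
                | some m' => exact fidx_append_of_some hf' _
                | none =>
                  rw [fidx_append_of_none hf', if_neg (fun he : dnew = key => hk he.symm)]
              rw [hfx]

-- ===== VERDICT (by name: the statement is the Claim_ definition above) =====
theorem solve3_spec : Claim_equal_solve3 := by
  intro s _
  show solve3 s = solve3_alt s
  have hA := (A_inv s.toList).2.1
  have hBd : (s.toList.foldl stepB ([((0 : Int), (0 : Int))], 0, 0)).1 = ds0 s.toList := by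
    rw [bfold]; rfl
  have hB := outer_loop (ds0 s.toList) ((ds0 s.toList).length)
  rw [length_ds0] at hB
  have halt : solve3_alt s
      = (PySem.List.pyRange 0 ((s.toList.length + 1 : Nat) : Int) 1).foldl
        (fun res j => (PySem.List.pyRange 0 j 1).foldl (fun res i =>
          if PySem.List.pyGetD (ds0 s.toList) i (0, 0) = PySem.List.pyGetD (ds0 s.toList) j (0, 0)
            ∧ j - i > res then j - i else res) res) 0 := by
    simp only [solve3_alt, hBd, length_ds0]
  rw [halt]
  exact best_unique hA hB
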